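-- pv_equiv track=rewrite | github.com/jluastro/JLU-python-code | jlu/microlens/align_epochs.py | TrialPars
-- ===== SOURCE A (Python) =====
-- def TrialPars(Nomit, transforms, magCuts, weightings):
--     Ntrans = len(transforms)
--     Nmags = len(magCuts)
--     Nweights = len(weightings)
--
--     Ntrials = Ntrans*Nmags*Nweights*(Nomit + 1)
--     a = []
--     m = []
--     w = []
--     o = []
--
--     for i in range(Ntrans):
--         for j in range(Nmags):
--             for k in range(Nweights):
--                 # The run with no omissions:
--                 a.append(transforms[i])
--                 m.append(magCuts[j])
--                 w.append(weightings[k])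
--                 o.append(None)
--
--                 # The runs with omissions (only if jacknife)
--                 for l in range(Nomit):
--                    a.append(transforms[i])
--                    m.append(magCuts[j])
--                    w.append(weightings[k])
--                    o.append(l)
--
--     return a, m, w, o, Ntrials
-- ===== SOURCE B (Python) =====
-- def TrialPars(Nomit, transforms, magCuts, weightings):
--     Ntrans = len(transforms)
--     Nmags = len(magCuts)
--     Nweights = len(weightings)
--     Ntrials = Ntrans*Nmags*Nweights*(Nomit + 1)
--
--     # one omission block, shared by every (transform, magCut, weighting) triple
--     omit_block = [None] + list(range(Nomit))
--     block = len(omit_block)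
--
--     # build each parallel list by its own tiling pattern instead of nested loops
--     a = [t for t in transforms for _ in range(Nmags * Nweights * block)]
--     m = [c for c in magCuts for _ in range(Nweights * block)] * Ntrans
--     w = [x for x in weightings for _ in range(block)] * (Ntrans * Nmags)
--     o = omit_block * (Ntrans * Nmags * Nweights)
--
--     return a, m, w, o, Ntrials
-- ===== Notes on version B (the rewrite author's own statement) =====
-- stated objective: alternative
-- what changed: Replaces the four nested per-element append loops by independent tiling: each of the five outputs is built in its own single pass via list repetition (inner-repeat comprehension or list*n) from one shared omission block.
import Mathlib
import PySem

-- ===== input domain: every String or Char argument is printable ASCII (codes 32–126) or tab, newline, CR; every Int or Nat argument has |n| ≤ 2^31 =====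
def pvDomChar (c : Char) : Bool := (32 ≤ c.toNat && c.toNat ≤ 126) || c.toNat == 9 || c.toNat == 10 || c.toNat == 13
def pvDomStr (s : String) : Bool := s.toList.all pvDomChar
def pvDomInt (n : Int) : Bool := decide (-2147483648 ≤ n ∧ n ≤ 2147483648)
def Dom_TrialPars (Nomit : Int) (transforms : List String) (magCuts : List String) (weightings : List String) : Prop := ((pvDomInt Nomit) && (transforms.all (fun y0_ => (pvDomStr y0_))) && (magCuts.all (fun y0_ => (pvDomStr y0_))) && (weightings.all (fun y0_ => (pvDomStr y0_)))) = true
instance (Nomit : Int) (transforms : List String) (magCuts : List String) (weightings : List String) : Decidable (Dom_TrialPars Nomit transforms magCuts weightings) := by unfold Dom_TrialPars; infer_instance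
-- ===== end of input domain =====

-- B builds each of the five outputs by its own tiling pattern (list repetition) instead of A's
-- interleaved nested append loops; same cost, different decomposition ("alternative").

-- ===== PORT A =====
def TrialPars (Nomit : Int) (transforms : List String) (magCuts : List String) (weightings : List String) : List String × List String × List String × List (Option Int) × Int :=
  let Ntrans : Int := transforms.length
  let Nmags : Int := magCuts.length
  let Nweights : Int := weightings.length
  let Ntrials : Int := Ntrans * Nmags * Nweights * (Nomit + 1)
  let st :=
    (PySem.List.pyRange 0 Ntrans 1).foldl (fun st i =>
      (PySem.List.pyRange 0 Nmags 1).foldl (fun st j =>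
        (PySem.List.pyRange 0 Nweights 1).foldl (fun st k =>
          -- the run with no omissions:
          let st := (st.1 ++ [PySem.List.pyGetD transforms i ""],
                     st.2.1 ++ [PySem.List.pyGetD magCuts j ""],
                     st.2.2.1 ++ [PySem.List.pyGetD weightings k ""],
                     st.2.2.2 ++ [(none : Option Int)])
          -- the runs with omissions (only if jackknife):
          (PySem.List.pyRange 0 Nomit 1).foldl (fun st l =>
            (st.1 ++ [PySem.List.pyGetD transforms i ""],
             st.2.1 ++ [PySem.List.pyGetD magCuts j ""],
             st.2.2.1 ++ [PySem.List.pyGetD weightings k ""],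
             st.2.2.2 ++ [some l])) st) st) st)
      (([] : List String), ([] : List String), ([] : List String), ([] : List (Option Int)))
  (st.1, st.2.1, st.2.2.1, st.2.2.2, Ntrials)

-- ===== PORT B =====
-- Python's  xs * n  (list repetition; empty for n ≤ 0)
def pyListMul {α : Type} (xs : List α) (n : Int) : List α :=
  (List.replicate n.toNat xs).flatten

def TrialPars_alt (Nomit : Int) (transforms : List String) (magCuts : List String) (weightings : List String) : List String × List String × List String × List (Option Int) × Int :=
  let Ntrans : Int := transforms.length
  let Nmags : Int := magCuts.length
  let Nweights : Int := weightings.length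
  let Ntrials : Int := Ntrans * Nmags * Nweights * (Nomit + 1)
  let omitBlock : List (Option Int) := none :: (PySem.List.pyRange 0 Nomit 1).map some
  let block : Int := omitBlock.length
  let a := transforms.flatMap (fun t => (PySem.List.pyRange 0 (Nmags * Nweights * block) 1).map (fun _ => t))
  let m := pyListMul (magCuts.flatMap (fun c => (PySem.List.pyRange 0 (Nweights * block) 1).map (fun _ => c))) Ntrans
  let w := pyListMul (weightings.flatMap (fun x => (PySem.List.pyRange 0 block 1).map (fun _ => x))) (Ntrans * Nmags)
  let o := pyListMul omitBlock (Ntrans * Nmags * Nweights)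
  (a, m, w, o, Ntrials)

-- ===== PRECONDITION & SPEC =====
def Spec_TrialPars (Nomit : Int) (transforms : List String) (magCuts : List String) (weightings : List String) (out : List String × List String × List String × List (Option Int) × Int) : Prop := out = TrialPars_alt Nomit transforms magCuts weightings
instance (Nomit : Int) (transforms : List String) (magCuts : List String) (weightings : List String) (out : List String × List String × List String × List (Option Int) × Int) : Decidable (Spec_TrialPars Nomit transforms magCuts weightings out) := by unfold Spec_TrialPars; infer_instance

-- ===== CLAIM (what is proved, stated in full; the proofs are below) =====
def Claim_equal_TrialPars : Prop := ∀ (Nomit : Int) (transforms : List String) (magCuts : List String) (weightings : List String), Dom_TrialPars Nomit transforms magCuts weightings → Spec_TrialPars Nomit transforms magCuts weightings (TrialPars Nomit transforms magCuts weightings)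

-- ===== LEMMAS AND PROOFS =====

-- the loop state: the four parallel accumulator lists
def PVSt : Type := List String × List String × List String × List (Option Int)

-- A's nested loops, named level by level (each def is definitionally the corresponding
-- piece of TrialPars' body, so the characterization lemmas below rewrite TrialPars)
def loopWdef (Nomit : Int) (ws : List String) (t m : String) (st : PVSt) : PVSt :=
  (PySem.List.pyRange 0 (ws.length : Int) 1).foldl (fun st k =>
    let st := (st.1 ++ [t], st.2.1 ++ [m],
               st.2.2.1 ++ [PySem.List.pyGetD ws k ""], st.2.2.2 ++ [(none : Option Int)])
    (PySem.List.pyRange 0 Nomit 1).foldl (fun st l =>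
      (st.1 ++ [t], st.2.1 ++ [m],
       st.2.2.1 ++ [PySem.List.pyGetD ws k ""], st.2.2.2 ++ [some l])) st) st

def loopMdef (Nomit : Int) (ms ws : List String) (t : String) (st : PVSt) : PVSt :=
  (PySem.List.pyRange 0 (ms.length : Int) 1).foldl
    (fun st j => loopWdef Nomit ws t (PySem.List.pyGetD ms j "") st) st

def loopTdef (Nomit : Int) (ts ms ws : List String) (st : PVSt) : PVSt :=
  (PySem.List.pyRange 0 (ts.length : Int) 1).foldl
    (fun st i => loopMdef Nomit ms ws (PySem.List.pyGetD ts i "") st) st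

-- the innermost (omission) loop
theorem loopO (t m w : String) (L' : List Int) :
    ∀ (st : PVSt),
    L'.foldl (fun st l =>
        (st.1 ++ [t], st.2.1 ++ [m], st.2.2.1 ++ [w], st.2.2.2 ++ [some l])) st
      = (st.1 ++ List.replicate L'.length t,
         st.2.1 ++ List.replicate L'.length m,
         st.2.2.1 ++ List.replicate L'.length w,
         st.2.2.2 ++ L'.map some) := by
  induction L' with
  | nil => intro st; simp
  | cons x xs ih =>
      intro st
      simp only [List.foldl_cons, ih, List.length_cons, List.map_cons]
      simp [List.replicate_succ, List.append_assoc]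

-- the weightings loop
theorem loopW_fold (Nomit : Int) (t m : String) :
    ∀ (ws : List String) (st : PVSt),
    ws.foldl (fun st w =>
        let st := (st.1 ++ [t], st.2.1 ++ [m], st.2.2.1 ++ [w], st.2.2.2 ++ [(none : Option Int)])
        (PySem.List.pyRange 0 Nomit 1).foldl (fun st l =>
          (st.1 ++ [t], st.2.1 ++ [m], st.2.2.1 ++ [w], st.2.2.2 ++ [some l])) st) st
      = (st.1 ++ (List.replicate ws.length
              (List.replicate ((PySem.List.pyRange 0 Nomit 1).length + 1) t)).flatten,
         st.2.1 ++ (List.replicate ws.length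
              (List.replicate ((PySem.List.pyRange 0 Nomit 1).length + 1) m)).flatten,
         st.2.2.1 ++ ws.flatMap
              (fun x => List.replicate ((PySem.List.pyRange 0 Nomit 1).length + 1) x),
         st.2.2.2 ++ (List.replicate ws.length
              ((none : Option Int) :: (PySem.List.pyRange 0 Nomit 1).map some)).flatten) := by
  intro ws
  induction ws with
  | nil => intro st; simp
  | cons w ws ih =>
      intro st
      simp only [List.foldl_cons]
      rw [ih]
      rw [loopO t m w (PySem.List.pyRange 0 Nomit 1)]
      simp [List.replicate_succ, List.append_assoc]

theorem loopW (Nomit : Int) (ws : List String) (t m : String) (st : PVSt) :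
    loopWdef Nomit ws t m st
      = (st.1 ++ (List.replicate ws.length
              (List.replicate ((PySem.List.pyRange 0 Nomit 1).length + 1) t)).flatten,
         st.2.1 ++ (List.replicate ws.length
              (List.replicate ((PySem.List.pyRange 0 Nomit 1).length + 1) m)).flatten,
         st.2.2.1 ++ ws.flatMap
              (fun x => List.replicate ((PySem.List.pyRange 0 Nomit 1).length + 1) x),
         st.2.2.2 ++ (List.replicate ws.length
              ((none : Option Int) :: (PySem.List.pyRange 0 Nomit 1).map some)).flatten) :=
  (PySem.List.foldl_pyRange_zero_pyGetD' ws ""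
    (fun st w =>
        let st := (st.1 ++ [t], st.2.1 ++ [m], st.2.2.1 ++ [w], st.2.2.2 ++ [(none : Option Int)])
        (PySem.List.pyRange 0 Nomit 1).foldl (fun st l =>
          (st.1 ++ [t], st.2.1 ++ [m], st.2.2.1 ++ [w], st.2.2.2 ++ [some l])) st)
    st).trans (loopW_fold Nomit t m ws st)

-- the magCuts loop
theorem loopM_fold (Nomit : Int) (ws : List String) (t : String) :
    ∀ (ms : List String) (st : PVSt),
    ms.foldl (fun st c => loopWdef Nomit ws t c st) st
      = (st.1 ++ (List.replicate ms.length
              ((List.replicate ws.length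
                (List.replicate ((PySem.List.pyRange 0 Nomit 1).length + 1) t)).flatten)).flatten,
         st.2.1 ++ ms.flatMap (fun x =>
              (List.replicate ws.length
                (List.replicate ((PySem.List.pyRange 0 Nomit 1).length + 1) x)).flatten),
         st.2.2.1 ++ (List.replicate ms.length
              (ws.flatMap
                (fun x => List.replicate ((PySem.List.pyRange 0 Nomit 1).length + 1) x))).flatten,
         st.2.2.2 ++ (List.replicate ms.length
              ((List.replicate ws.length
                ((none : Option Int) :: (PySem.List.pyRange 0 Nomit 1).map some)).flatten)).flatten) := by
  intro ms
  induction ms with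
  | nil => intro st; simp
  | cons c ms ih =>
      intro st
      simp only [List.foldl_cons]
      rw [ih, loopW]
      simp [List.replicate_succ, List.append_assoc]

theorem loopM (Nomit : Int) (ms ws : List String) (t : String) (st : PVSt) :
    loopMdef Nomit ms ws t st
      = (st.1 ++ (List.replicate ms.length
              ((List.replicate ws.length
                (List.replicate ((PySem.List.pyRange 0 Nomit 1).length + 1) t)).flatten)).flatten,
         st.2.1 ++ ms.flatMap (fun x =>
              (List.replicate ws.length
                (List.replicate ((PySem.List.pyRange 0 Nomit 1).length + 1) x)).flatten),
         st.2.2.1 ++ (List.replicate ms.length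
              (ws.flatMap
                (fun x => List.replicate ((PySem.List.pyRange 0 Nomit 1).length + 1) x))).flatten,
         st.2.2.2 ++ (List.replicate ms.length
              ((List.replicate ws.length
                ((none : Option Int) :: (PySem.List.pyRange 0 Nomit 1).map some)).flatten)).flatten) :=
  (PySem.List.foldl_pyRange_zero_pyGetD' ms ""
    (fun st c => loopWdef Nomit ws t c st) st).trans (loopM_fold Nomit ws t ms st)

-- the transforms loop
theorem loopT_fold (Nomit : Int) (ms ws : List String) :
    ∀ (ts : List String) (st : PVSt),
    ts.foldl (fun st t => loopMdef Nomit ms ws t st) st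
      = (st.1 ++ ts.flatMap (fun t =>
              (List.replicate ms.length
                ((List.replicate ws.length
                  (List.replicate ((PySem.List.pyRange 0 Nomit 1).length + 1) t)).flatten)).flatten),
         st.2.1 ++ (List.replicate ts.length
              (ms.flatMap (fun x =>
                (List.replicate ws.length
                  (List.replicate ((PySem.List.pyRange 0 Nomit 1).length + 1) x)).flatten))).flatten,
         st.2.2.1 ++ (List.replicate ts.length
              ((List.replicate ms.length
                (ws.flatMap
                  (fun x => List.replicate ((PySem.List.pyRange 0 Nomit 1).length + 1) x))).flatten)).flatten,
         st.2.2.2 ++ (List.replicate ts.length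
              ((List.replicate ms.length
                ((List.replicate ws.length
                  ((none : Option Int) :: (PySem.List.pyRange 0 Nomit 1).map some)).flatten)).flatten)).flatten) := by
  intro ts
  induction ts with
  | nil => intro st; simp
  | cons t ts ih =>
      intro st
      simp only [List.foldl_cons]
      rw [ih, loopM]
      simp [List.replicate_succ, List.append_assoc]

theorem loopT (Nomit : Int) (ts ms ws : List String) (st : PVSt) :
    loopTdef Nomit ts ms ws st
      = (st.1 ++ ts.flatMap (fun t =>
              (List.replicate ms.length
                ((List.replicate ws.length
                  (List.replicate ((PySem.List.pyRange 0 Nomit 1).length + 1) t)).flatten)).flatten),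
         st.2.1 ++ (List.replicate ts.length
              (ms.flatMap (fun x =>
                (List.replicate ws.length
                  (List.replicate ((PySem.List.pyRange 0 Nomit 1).length + 1) x)).flatten))).flatten,
         st.2.2.1 ++ (List.replicate ts.length
              ((List.replicate ms.length
                (ws.flatMap
                  (fun x => List.replicate ((PySem.List.pyRange 0 Nomit 1).length + 1) x))).flatten)).flatten,
         st.2.2.2 ++ (List.replicate ts.length
              ((List.replicate ms.length
                ((List.replicate ws.length
                  ((none : Option Int) :: (PySem.List.pyRange 0 Nomit 1).map some)).flatten)).flatten)).flatten) :=
  (PySem.List.foldl_pyRange_zero_pyGetD' ts ""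
    (fun st t => loopMdef Nomit ms ws t st) st).trans (loopT_fold Nomit ms ws ts st)

-- replicate/flatten arithmetic used to match B's tiling
theorem flatten_replicate_replicate {α : Type} (a b : Nat) (x : α) :
    (List.replicate a (List.replicate b x)).flatten = List.replicate (a * b) x := by
  induction a with
  | zero => simp
  | succ a ih =>
      have h : (a + 1) * b = b + a * b := by ring
      rw [List.replicate_succ, List.flatten_cons, ih, h, List.replicate_add]

theorem flatten_replicate_flatten {α : Type} (a b : Nat) (xs : List α) :
    (List.replicate a ((List.replicate b xs).flatten)).flatten
      = (List.replicate (a * b) xs).flatten := by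
  induction a with
  | zero => simp
  | succ a ih =>
      have h : (a + 1) * b = b + a * b := by ring
      rw [List.replicate_succ, List.flatten_cons, ih, h, List.replicate_add, List.flatten_append]

-- a constant comprehension over range(n) is a replicate
theorem map_const_pyRange {α : Type} (n : Int) (x : α) :
    (PySem.List.pyRange 0 n 1).map (fun _ => x) = List.replicate n.toNat x := by
  rw [List.map_const', PySem.List.length_pyRange_one]
  simp

theorem TrialPars_eq_alt (Nomit : Int) (ts ms ws : List String) :
    TrialPars Nomit ts ms ws = TrialPars_alt Nomit ts ms ws := by
  have h0 : TrialPars Nomit ts ms ws =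
      ((loopTdef Nomit ts ms ws ([], [], [], [])).1,
       (loopTdef Nomit ts ms ws ([], [], [], [])).2.1,
       (loopTdef Nomit ts ms ws ([], [], [], [])).2.2.1,
       (loopTdef Nomit ts ms ws ([], [], [], [])).2.2.2,
       (ts.length : Int) * (ms.length : Int) * (ws.length : Int) * (Nomit + 1)) := rfl
  have hocl : ((none : Option Int) :: (PySem.List.pyRange 0 Nomit 1).map some).length
      = (PySem.List.pyRange 0 Nomit 1).length + 1 := by simp
  have h1 : ∀ t : String,
      (PySem.List.pyRange 0 ((ms.length : Int) * (ws.length : Int)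
          * (((PySem.List.pyRange 0 Nomit 1).length + 1 : Nat) : Int)) 1).map (fun _ => t)
        = List.replicate (ms.length * (ws.length * ((PySem.List.pyRange 0 Nomit 1).length + 1))) t := by
    intro t
    rw [map_const_pyRange _ t]
    congr 1
    rw [show ((ms.length : Int) * (ws.length : Int)
          * (((PySem.List.pyRange 0 Nomit 1).length + 1 : Nat) : Int))
        = (((ms.length * (ws.length * ((PySem.List.pyRange 0 Nomit 1).length + 1))) : Nat) : Int) by
      push_cast; ring]
    exact Int.toNat_natCast _
  have h2 : ∀ t : String,
      (PySem.List.pyRange 0 ((ws.length : Int)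
          * (((PySem.List.pyRange 0 Nomit 1).length + 1 : Nat) : Int)) 1).map (fun _ => t)
        = List.replicate (ws.length * ((PySem.List.pyRange 0 Nomit 1).length + 1)) t := by
    intro t
    rw [map_const_pyRange _ t]
    congr 1
  have h3 : ∀ t : String,
      (PySem.List.pyRange 0 ((((PySem.List.pyRange 0 Nomit 1).length + 1 : Nat) : Int)) 1).map
          (fun _ => t)
        = List.replicate ((PySem.List.pyRange 0 Nomit 1).length + 1) t := by
    intro t
    rw [map_const_pyRange _ t]
    congr 1
  have h4 : ((ts.length : Int) * (ms.length : Int)).toNat = ts.length * ms.length := by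
    rw [show ((ts.length : Int) * (ms.length : Int)) = (((ts.length * ms.length) : Nat) : Int) by
      push_cast; ring]
    exact Int.toNat_natCast _
  have h5 : ((ts.length : Int) * (ms.length : Int) * (ws.length : Int)).toNat
      = ts.length * ms.length * ws.length := by
    rw [show ((ts.length : Int) * (ms.length : Int) * (ws.length : Int))
        = (((ts.length * ms.length * ws.length) : Nat) : Int) by push_cast; ring]
    exact Int.toNat_natCast _
  rw [h0, loopT]
  simp only [TrialPars_alt, pyListMul, hocl, h1, h2, h3, h4, h5, Int.toNat_natCast,
    flatten_replicate_replicate, flatten_replicate_flatten, List.nil_append]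
  simp [Nat.mul_assoc]

-- ===== VERDICT (by name: the statement is the Claim_ definition above) =====
theorem TrialPars_spec : Claim_equal_TrialPars := by
  intro Nomit ts ms ws _
  unfold Spec_TrialPars
  exact TrialPars_eq_alt Nomit ts ms ws
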